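-- pv_equiv track=rewrite | github.com/stefanhermes-code/Observatory | core/customer_filter.py | filter_candidates_by_spec_with_stats
-- ===== SOURCE A (Python) =====
-- from typing import Any, Dict, List, Tuple
--
-- def filter_candidates_by_spec_with_stats(
--     candidates: List[Dict[str, Any]],
--     spec: Dict[str, Any],
-- ) -> Tuple[List[Dict[str, Any]], Dict[str, int]]:
--     """
--     Same as filter_candidates_by_spec but also returns drop counts for audit.
--     Returns (filtered_list, {"dropped_total", "failed_region_filter", "failed_value_chain_filter", "no_mapped_category"}).
--     """
--     regions = spec.get("regions") or []
--     categories = spec.get("categories") or []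
--     # Ultra-relaxed: value_chain_link is optional and must not influence filtering outcome.
--     value_chain_links = spec.get("value_chain_links") or []
--
--     stats: Dict[str, int] = {"dropped_total": 0, "failed_region_filter": 0, "failed_value_chain_filter": 0, "no_mapped_category": 0}
--
--     if not regions and not categories and not value_chain_links:
--         return list(candidates), stats
--
--     filtered: List[Dict[str, Any]] = []
--     for c in candidates:
--         region = (c.get("region") or "").strip()
--         category = (c.get("category") or "").strip()
--         vcl = (c.get("value_chain_link") or "").strip()
--
--         ok_region = (not regions) or (region in regions)
--         ok_category = (not categories) or (category in categories)
--         # Ignore vcl completely for Run 9 philosophy.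
--         ok_vcl = True
--
--         # Allow missing category through when categories are constrained.
--         ok_category_relaxed = ok_category or (categories and not category)
--
--         if ok_region and ok_category_relaxed and ok_vcl:
--             filtered.append(c)
--         else:
--             stats["dropped_total"] += 1
--             if not ok_region:
--                 stats["failed_region_filter"] += 1
--             # Ultra-relaxed: missing category is not a drop reason.
--             if not ok_category_relaxed:
--                 stats["no_mapped_category"] += 1
--             # Ultra-relaxed: value_chain filtering disabled.
--     return filtered, stats
-- ===== SOURCE B (Python) =====
-- from typing import Any, Dict, List, Tuple
--
-- def filter_candidates_by_spec_with_stats(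
--     candidates: List[Dict[str, Any]],
--     spec: Dict[str, Any],
-- ) -> Tuple[List[Dict[str, Any]], Dict[str, int]]:
--     regions = spec.get("regions") or []
--     categories = spec.get("categories") or []
--
--     def region_of(c):
--         return (c.get("region") or "").strip()
--
--     def category_of(c):
--         return (c.get("category") or "").strip()
--
--     def ok_region(c):
--         return not regions or region_of(c) in regions
--
--     def ok_category(c):
--         return not categories or category_of(c) in categories or not category_of(c)
--
--     filtered = [c for c in candidates if ok_region(c) and ok_category(c)]
--     stats = {
--         "dropped_total": sum(1 for c in candidates if not (ok_region(c) and ok_category(c))),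
--         "failed_region_filter": sum(1 for c in candidates if not ok_region(c)),
--         "failed_value_chain_filter": 0,
--         "no_mapped_category": sum(1 for c in candidates if not ok_category(c)),
--     }
--     return filtered, stats
-- ===== Notes on version B (the rewrite author's own statement) =====
-- stated objective: simpler
-- what changed: Replaces the single fused loop that mutates a stats dict with an order-preserving filter comprehension plus three independent counting passes (one per aggregate), and drops the redundant all-empty-spec early return.
import Mathlib
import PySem

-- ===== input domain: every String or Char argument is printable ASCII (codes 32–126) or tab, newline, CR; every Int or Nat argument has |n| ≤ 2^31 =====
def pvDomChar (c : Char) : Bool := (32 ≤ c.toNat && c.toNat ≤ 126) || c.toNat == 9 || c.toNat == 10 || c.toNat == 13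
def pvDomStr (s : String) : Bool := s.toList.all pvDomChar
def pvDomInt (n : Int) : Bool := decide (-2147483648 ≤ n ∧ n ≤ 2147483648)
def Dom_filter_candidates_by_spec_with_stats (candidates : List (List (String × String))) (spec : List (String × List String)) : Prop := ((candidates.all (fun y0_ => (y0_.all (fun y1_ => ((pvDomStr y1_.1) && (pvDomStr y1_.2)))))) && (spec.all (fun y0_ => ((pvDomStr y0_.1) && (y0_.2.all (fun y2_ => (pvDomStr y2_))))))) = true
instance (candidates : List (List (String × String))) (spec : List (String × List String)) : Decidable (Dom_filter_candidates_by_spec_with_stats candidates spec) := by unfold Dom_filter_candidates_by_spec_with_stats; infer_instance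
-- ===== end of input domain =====

-- B replaces A's single fused loop (mutating a stats dict) by an order-preserving filter
-- plus three independent counting passes; objective: simpler.


-- ===== PORT A =====
-- the body of A's for-loop, factored out as a helper (one iteration, mutating (filtered, stats))
def pvStepA (regions categories : List String)
    (acc : List (List (String × String)) × PySem.Dict String Int) (c : List (String × String)) :
    List (List (String × String)) × PySem.Dict String Int :=
  let region := PySem.Str.strip (((PySem.Dict.mk c).get? "region").getD "")
  let category := PySem.Str.strip (((PySem.Dict.mk c).get? "category").getD "")
  let _vcl := PySem.Str.strip (((PySem.Dict.mk c).get? "value_chain_link").getD "")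
  let ok_region := regions.isEmpty || regions.contains region
  let ok_category := categories.isEmpty || categories.contains category
  let ok_vcl := true
  let ok_category_relaxed := ok_category || (!categories.isEmpty && category == "")
  if ok_region && ok_category_relaxed && ok_vcl then
    (acc.1 ++ [c], acc.2)
  else
    let d1 := acc.2.modify "dropped_total" 0 (· + 1)
    let d2 := if !ok_region then d1.modify "failed_region_filter" 0 (· + 1) else d1
    let d3 := if !ok_category_relaxed then d2.modify "no_mapped_category" 0 (· + 1) else d2
    (acc.1, d3)

def filter_candidates_by_spec_with_stats (candidates : List (List (String × String))) (spec : List (String × List String)) : (List (List (String × String))) × (List (String × Int)) :=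
  let regions := ((PySem.Dict.mk spec).get? "regions").getD []
  let categories := ((PySem.Dict.mk spec).get? "categories").getD []
  let value_chain_links := ((PySem.Dict.mk spec).get? "value_chain_links").getD []
  let stats : PySem.Dict String Int :=
    PySem.Dict.mk [("dropped_total", 0), ("failed_region_filter", 0), ("failed_value_chain_filter", 0), ("no_mapped_category", 0)]
  if regions.isEmpty && categories.isEmpty && value_chain_links.isEmpty then
    (candidates, stats.items)
  else
    let res := candidates.foldl (pvStepA regions categories) ([], stats)
    (res.1, res.2.items)

-- ===== PORT B =====
def filter_candidates_by_spec_with_stats_alt (candidates : List (List (String × String))) (spec : List (String × List String)) : (List (List (String × String))) × (List (String × Int)) :=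
  let regions := ((PySem.Dict.mk spec).get? "regions").getD []
  let categories := ((PySem.Dict.mk spec).get? "categories").getD []
  let regionOf := fun (c : List (String × String)) => PySem.Str.strip (((PySem.Dict.mk c).get? "region").getD "")
  let categoryOf := fun (c : List (String × String)) => PySem.Str.strip (((PySem.Dict.mk c).get? "category").getD "")
  let okRegion := fun c => regions.isEmpty || regions.contains (regionOf c)
  let okCategory := fun c => categories.isEmpty || categories.contains (categoryOf c) || categoryOf c == ""
  ( candidates.filter (fun c => okRegion c && okCategory c),
    [("dropped_total", (candidates.countP (fun c => !(okRegion c && okCategory c)) : Int)),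
     ("failed_region_filter", (candidates.countP (fun c => !okRegion c) : Int)),
     ("failed_value_chain_filter", 0),
     ("no_mapped_category", (candidates.countP (fun c => !okCategory c) : Int))] )

-- ===== PRECONDITION & SPEC =====
def Spec_filter_candidates_by_spec_with_stats (candidates : List (List (String × String))) (spec : List (String × List String)) (out : (List (List (String × String))) × (List (String × Int))) : Prop := out = filter_candidates_by_spec_with_stats_alt candidates spec
instance (candidates : List (List (String × String))) (spec : List (String × List String)) (out : (List (List (String × String))) × (List (String × Int))) : Decidable (Spec_filter_candidates_by_spec_with_stats candidates spec out) := by unfold Spec_filter_candidates_by_spec_with_stats; infer_instance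

-- ===== CLAIM (what is proved, stated in full; the proofs are below) =====
def Claim_equal_filter_candidates_by_spec_with_stats : Prop := ∀ (candidates : List (List (String × String))) (spec : List (String × List String)), Dom_filter_candidates_by_spec_with_stats candidates spec → Spec_filter_candidates_by_spec_with_stats candidates spec (filter_candidates_by_spec_with_stats candidates spec)

-- ===== LEMMAS AND PROOFS =====

-- A's per-candidate tests, as standalone predicates
def pvOkRegionA (regions : List String) (c : List (String × String)) : Bool :=
  regions.isEmpty || regions.contains (PySem.Str.strip (((PySem.Dict.mk c).get? "region").getD ""))

def pvOkCatRelA (categories : List String) (c : List (String × String)) : Bool :=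
  (categories.isEmpty || categories.contains (PySem.Str.strip (((PySem.Dict.mk c).get? "category").getD "")))
    || (!categories.isEmpty && PySem.Str.strip (((PySem.Dict.mk c).get? "category").getD "") == "")

-- one iteration's branch structure, with the two tests abstracted as Booleans
theorem pv_step_abs (okR okC : Bool) (x : List (String × String))
    (f : List (List (String × String))) (a b cv d : Int) :
    (if okR && okC && true then
      (f ++ [x], PySem.Dict.mk [("dropped_total", a), ("failed_region_filter", b), ("failed_value_chain_filter", cv), ("no_mapped_category", d)])
    else
      let d1 := (PySem.Dict.mk [("dropped_total", a), ("failed_region_filter", b), ("failed_value_chain_filter", cv), ("no_mapped_category", d)]).modify "dropped_total" 0 (· + 1)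
      let d2 := if !okR then d1.modify "failed_region_filter" 0 (· + 1) else d1
      let d3 := if !okC then d2.modify "no_mapped_category" 0 (· + 1) else d2
      (f, d3))
    = (if okR && okC then f ++ [x] else f,
       PySem.Dict.mk [("dropped_total", if okR && okC then a else a + 1),
                      ("failed_region_filter", if okR then b else b + 1),
                      ("failed_value_chain_filter", cv),
                      ("no_mapped_category", if okC then d else d + 1)]) := by
  cases okR <;> cases okC <;>
    simp [PySem.Dict.modify, PySem.Dict.contains, PySem.Dict.getD, PySem.Dict.get?, PySem.Dict.insert]

-- one loop iteration of A, on a stats dict of the fixed literal shape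
theorem pvStepA_eq (regions categories : List String) (x : List (String × String))
    (f : List (List (String × String))) (a b cv d : Int) :
    pvStepA regions categories
      (f, PySem.Dict.mk [("dropped_total", a), ("failed_region_filter", b), ("failed_value_chain_filter", cv), ("no_mapped_category", d)]) x
    = (if pvOkRegionA regions x && pvOkCatRelA categories x then f ++ [x] else f,
       PySem.Dict.mk [("dropped_total", if pvOkRegionA regions x && pvOkCatRelA categories x then a else a + 1),
                      ("failed_region_filter", if pvOkRegionA regions x then b else b + 1),
                      ("failed_value_chain_filter", cv),
                      ("no_mapped_category", if pvOkCatRelA categories x then d else d + 1)]) := by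
  exact pv_step_abs (pvOkRegionA regions x) (pvOkCatRelA categories x) x f a b cv d

-- A's whole loop versus B's three independent counts
theorem pv_loop_char (regions categories : List String)
    (l : List (List (String × String))) (f : List (List (String × String))) (a b cv d : Int) :
    l.foldl (pvStepA regions categories)
      (f, PySem.Dict.mk [("dropped_total", a), ("failed_region_filter", b), ("failed_value_chain_filter", cv), ("no_mapped_category", d)])
    = (f ++ l.filter (fun c => pvOkRegionA regions c && pvOkCatRelA categories c),
       PySem.Dict.mk [("dropped_total", a + (l.countP (fun c => !(pvOkRegionA regions c && pvOkCatRelA categories c)) : Int)),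
                      ("failed_region_filter", b + (l.countP (fun c => !pvOkRegionA regions c) : Int)),
                      ("failed_value_chain_filter", cv),
                      ("no_mapped_category", d + (l.countP (fun c => !pvOkCatRelA categories c) : Int))]) := by
  induction l generalizing f a b d with
  | nil => simp
  | cons x xs ih =>
    rw [List.foldl_cons, pvStepA_eq, ih]
    cases hR : pvOkRegionA regions x <;> cases hC : pvOkCatRelA categories x <;>
    · try simp [hR, hC]
      try push_cast
      try ring_nf
      try simp

-- A's relaxed category test equals B's flat three-way disjunction
theorem pvOkCat_eq (categories : List String) (c : List (String × String)) :
    pvOkCatRelA categories c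
    = (categories.isEmpty || categories.contains (PySem.Str.strip (((PySem.Dict.mk c).get? "category").getD "")) || (PySem.Str.strip (((PySem.Dict.mk c).get? "category").getD "") == "")) := by
  cases categories <;> simp [pvOkCatRelA]

-- ===== VERDICT (by name: the statement is the Claim_ definition above) =====
theorem filter_candidates_by_spec_with_stats_spec : Claim_equal_filter_candidates_by_spec_with_stats := by
  intro candidates spec _
  unfold Spec_filter_candidates_by_spec_with_stats
  unfold filter_candidates_by_spec_with_stats filter_candidates_by_spec_with_stats_alt
  set R := ((PySem.Dict.mk spec).get? "regions").getD [] with hRdef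
  set C := ((PySem.Dict.mk spec).get? "categories").getD [] with hCdef
  set V := ((PySem.Dict.mk spec).get? "value_chain_links").getD [] with hVdef
  by_cases h : (R.isEmpty && C.isEmpty && V.isEmpty) = true
  · rw [if_pos h]
    simp only [Bool.and_eq_true, List.isEmpty_iff] at h
    obtain ⟨⟨hr, hc⟩, -⟩ := h
    simp [hr, hc]
  · rw [if_neg h]
    rw [pv_loop_char]
    simp only [List.nil_append, zero_add]
    refine congrArg₂ Prod.mk ?_ ?_
    · exact List.filter_congr (fun c _ => by rw [pvOkCat_eq]; rfl)
    · have h1 : candidates.countP (fun c => !(pvOkRegionA R c && pvOkCatRelA C c))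
          = candidates.countP (fun c => !(pvOkRegionA R c
              && (C.isEmpty || C.contains (PySem.Str.strip (((PySem.Dict.mk c).get? "category").getD ""))
                  || (PySem.Str.strip (((PySem.Dict.mk c).get? "category").getD "") == "")))) :=
        List.countP_congr (fun c _ => by rw [pvOkCat_eq])
      have h3 : candidates.countP (fun c => !pvOkCatRelA C c)
          = candidates.countP (fun c => !(C.isEmpty
              || C.contains (PySem.Str.strip (((PySem.Dict.mk c).get? "category").getD ""))
              || (PySem.Str.strip (((PySem.Dict.mk c).get? "category").getD "") == ""))) :=
        List.countP_congr (fun c _ => by rw [pvOkCat_eq])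
      rw [h1, h3]
      rfl
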